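-- pv_equiv track=rewrite | github.com/shotakoyama/arteraro | arteraro/falsliter/data_split.py | split_data_to_chunk
-- ===== SOURCE A (Python) =====
-- def get_chunk_end_list(data, N):
--     data_size = sum(len(sent) for sent in data)
--     chunk_size = data_size // N
--     chunk_end_list = [chunk_size * (n + 1) - 1 for n in range(N)]
--     return chunk_end_list
--
-- def split_data_to_chunk(data, N):
--     i = 0
--     accum = 0
--     chunk_list = []
--     for chunk_end in get_chunk_end_list(data, N):
--         chunk = []
--         while accum < chunk_end:
--             chunk.append(data[i])
--             accum += len(data[i])
--             i += 1
--         chunk_list.append(chunk)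
--     return chunk_list
-- ===== SOURCE B (Python) =====
-- def get_chunk_end_list(data, N):
--     data_size = sum(len(sent) for sent in data)
--     chunk_size = data_size // N
--     chunk_end_list = [chunk_size * (n + 1) - 1 for n in range(N)]
--     return chunk_end_list
--
-- def split_data_to_chunk(data, N):
--     # prefix sums once, then each chunk is a filter of (sentence, prefix) pairs
--     # by the half-open threshold interval [lo, e).
--     prefixes = []
--     a = 0
--     for sent in data:
--         prefixes.append(a)
--         a += len(sent)
--     pairs = list(zip(data, prefixes))
--     chunk_list = []
--     lo = -1
--     for e in get_chunk_end_list(data, N):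
--         chunk_list.append([s for s, p in pairs if lo <= p < e])
--         lo = e
--     return chunk_list
-- ===== Notes on version B (the rewrite author's own statement) =====
-- stated objective: alternative
-- what changed: Instead of A's stateful consumer (an index/accumulator pair threaded through a while-loop nested in the pass over chunk boundaries), B computes the prefix-length of every sentence once and builds each chunk as a filter of (sentence, prefix) pairs by the half-open threshold interval [previous end, current end).
import Mathlib
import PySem

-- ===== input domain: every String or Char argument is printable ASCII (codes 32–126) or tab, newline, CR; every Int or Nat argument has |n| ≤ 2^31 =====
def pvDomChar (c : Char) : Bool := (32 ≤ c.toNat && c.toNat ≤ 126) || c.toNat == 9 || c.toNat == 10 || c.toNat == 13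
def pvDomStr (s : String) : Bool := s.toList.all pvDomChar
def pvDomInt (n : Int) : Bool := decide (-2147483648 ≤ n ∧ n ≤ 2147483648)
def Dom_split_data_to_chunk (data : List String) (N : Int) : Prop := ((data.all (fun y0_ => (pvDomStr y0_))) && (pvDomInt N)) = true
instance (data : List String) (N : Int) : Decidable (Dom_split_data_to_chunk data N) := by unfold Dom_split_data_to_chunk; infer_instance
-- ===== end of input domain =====

-- B replaces A's stateful consumption (index + accumulator inside a while-loop nested in the
-- boundary pass) by one prefix-sum pass plus, per chunk boundary, a filter of (sentence, prefix)
-- pairs by a threshold interval — an alternative decomposition of the same split.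


-- ===== PORT A =====
-- shared module helper (Source B contains the same function verbatim)
def get_chunk_end_list (data : List String) (N : Int) : List Int :=
  let data_size := (data.map PySem.Str.len).sum
  let chunk_size := PySem.Int.floordiv data_size N
  (PySem.List.pyRange 0 N 1).map (fun n => chunk_size * (n + 1) - 1)

-- A's inner 'while accum < chunk_end' loop: consumes sentences off the remaining suffix
-- (data[i], i += 1 rendered as the suffix of data from position i).  The [] case is Python's
-- IndexError branch; it is unreachable for the ends get_chunk_end_list produces.
def pvTakeChunk (rest : List String) (accum e : Int) : List String × List String × Int :=
  if accum < e then
    match rest with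
    | [] => ([], [], accum)
    | s :: rs =>
      let r := pvTakeChunk rs (accum + PySem.Str.len s) e
      (s :: r.1, r.2.1, r.2.2)
  else ([], rest, accum)

-- one iteration of A's outer 'for chunk_end in …' loop; state = (chunk_list, rest, accum)
def pvAStep (st : List (List String) × List String × Int) (e : Int) :
    List (List String) × List String × Int :=
  let r := pvTakeChunk st.2.1 st.2.2 e
  (st.1 ++ [r.1], r.2.1, r.2.2)

def split_data_to_chunk (data : List String) (N : Int) : List (List String) :=
  ((get_chunk_end_list data N).foldl pvAStep ([], data, 0)).1

-- ===== PORT B =====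
-- B's first loop: prefixes.append(a); a += len(sent)
def pvPrefixes (data : List String) : List Int :=
  (data.foldl (fun (st : List Int × Int) sent => (st.1 ++ [st.2], st.2 + PySem.Str.len sent))
    ([], 0)).1

-- one iteration of B's 'for e in …' loop; state = (chunk_list, lo);
-- the appended chunk is the comprehension [s for s, p in pairs if lo <= p < e]
def pvBStep (pairs : List (String × Int)) (st : List (List String) × Int) (e : Int) :
    List (List String) × Int :=
  (st.1 ++ [(pairs.filter (fun sp => decide (st.2 ≤ sp.2) && decide (sp.2 < e))).map Prod.fst],
   e)

def split_data_to_chunk_alt (data : List String) (N : Int) : List (List String) :=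
  let pairs := data.zip (pvPrefixes data)
  ((get_chunk_end_list data N).foldl (pvBStep pairs) ([], -1)).1

-- ===== PRECONDITION & SPEC =====
-- N = 0 makes 'data_size // N' raise ZeroDivisionError in Python (in A and in B alike);
-- nothing else raises, so Pre_ is exactly N ≠ 0.
def Pre_split_data_to_chunk (data : List String) (N : Int) : Prop := N ≠ 0
instance (data : List String) (N : Int) : Decidable (Pre_split_data_to_chunk data N) := by
  unfold Pre_split_data_to_chunk; infer_instance

def pvWitness_split_data_to_chunk : List String × Int := (["ab", "c", "def"], 2)

def Spec_split_data_to_chunk (data : List String) (N : Int) (out : List (List String)) : Prop :=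
  out = split_data_to_chunk_alt data N
instance (data : List String) (N : Int) (out : List (List String)) :
    Decidable (Spec_split_data_to_chunk data N out) := by
  unfold Spec_split_data_to_chunk; infer_instance

-- ===== CLAIM (what is proved, stated in full; the proofs are below) =====
def Claim_equal_split_data_to_chunk : Prop :=
  ∀ (data : List String) (N : Int), Dom_split_data_to_chunk data N →
    Pre_split_data_to_chunk data N →
    Spec_split_data_to_chunk data N (split_data_to_chunk data N)

-- ===== LEMMAS AND PROOFS =====

-- the remaining suffix of data paired with its running prefix lengths, starting at a
def pvZipPref : List String → Int → List (String × Int)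
  | [], _ => []
  | s :: rs, a => (s, a) :: pvZipPref rs (a + PySem.Str.len s)

lemma pvZipPref_le : ∀ (rest : List String) (a : Int), ∀ sp ∈ pvZipPref rest a, a ≤ sp.2 := by
  intro rest
  induction rest with
  | nil => intro a sp h; simp [pvZipPref] at h
  | cons s rs ih =>
    intro a sp h
    simp only [pvZipPref, List.mem_cons] at h
    rcases h with h | h
    · simp [h]
    · have := ih (a + PySem.Str.len s) sp h
      have hl : (0:Int) ≤ PySem.Str.len s := Int.zero_le_ofNat s.toList.length
      omega

lemma pvFilter_le_self (rest : List String) (a lo : Int) (h : lo ≤ a) :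
    (pvZipPref rest a).filter (fun sp => decide (lo ≤ sp.2)) = pvZipPref rest a := by
  apply List.filter_eq_self.2
  intro sp hsp
  have := pvZipPref_le rest a sp hsp
  simp; omega

lemma pvFilter_lt_eq_takeWhile : ∀ (rest : List String) (accum e : Int),
    (pvZipPref rest accum).filter (fun sp => decide (sp.2 < e))
      = (pvZipPref rest accum).takeWhile (fun sp => decide (sp.2 < e)) := by
  intro rest
  induction rest with
  | nil => intro a e; simp [pvZipPref]
  | cons s rs ih =>
    intro a e
    by_cases h : a < e
    · simp [pvZipPref, h, ih]
    · simp only [pvZipPref]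
      rw [List.filter_cons, List.takeWhile_cons]
      simp only [h, decide_false]
      simp only [Bool.false_eq_true, if_false]
      apply List.filter_eq_nil_iff.2
      intro sp hsp
      have h1 := pvZipPref_le rs (a + PySem.Str.len s) sp hsp
      have hl : (0:Int) ≤ PySem.Str.len s := Int.zero_le_ofNat s.toList.length
      simp; omega

lemma pvFilter_ge_eq_dropWhile : ∀ (rest : List String) (accum e : Int),
    (pvZipPref rest accum).filter (fun sp => decide (e ≤ sp.2))
      = (pvZipPref rest accum).dropWhile (fun sp => decide (sp.2 < e)) := by
  intro rest
  induction rest with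
  | nil => intro a e; simp [pvZipPref]
  | cons s rs ih =>
    intro a e
    by_cases h : a < e
    · have h2 : ¬ (e ≤ a) := by omega
      simp [pvZipPref, h, h2, ih]
    · simp only [pvZipPref]
      rw [List.filter_cons, List.dropWhile_cons]
      simp only [h, decide_false]
      have h2 : e ≤ a := by omega
      simp only [h2, decide_true, if_true]
      simp only [Bool.false_eq_true, if_false]
      congr 1
      apply List.filter_eq_self.2
      intro sp hsp
      have h1 := pvZipPref_le rs (a + PySem.Str.len s) sp hsp
      have hl : (0:Int) ≤ PySem.Str.len s := Int.zero_le_ofNat s.toList.length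
      simp; omega

lemma pvTakeChunk_spec : ∀ (rest : List String) (accum e : Int),
    (pvTakeChunk rest accum e).1
      = ((pvZipPref rest accum).takeWhile (fun sp => decide (sp.2 < e))).map Prod.fst
    ∧ pvZipPref (pvTakeChunk rest accum e).2.1 (pvTakeChunk rest accum e).2.2
      = (pvZipPref rest accum).dropWhile (fun sp => decide (sp.2 < e)) := by
  intro rest
  induction rest with
  | nil =>
    intro a e
    by_cases h : a < e <;> simp [pvTakeChunk, pvZipPref, h]
  | cons s rs ih =>
    intro a e
    by_cases h : a < e
    · have := ih (a + PySem.Str.len s) e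
      simp only [pvTakeChunk, h, if_true, pvZipPref, List.takeWhile_cons, List.dropWhile_cons,
        decide_true, List.map_cons]
      simpa using this
    · simp [pvTakeChunk, h, pvZipPref]

lemma pvPrefixes_spec : ∀ (data : List String) (l : List Int) (a : Int),
    (data.foldl (fun (st : List Int × Int) sent => (st.1 ++ [st.2], st.2 + PySem.Str.len sent))
      (l, a)).1 = l ++ (pvZipPref data a).map Prod.snd := by
  intro data
  induction data with
  | nil => intro l a; simp [pvZipPref]
  | cons s rs ih =>
    intro l a
    simp only [List.foldl_cons, pvZipPref, List.map_cons]
    rw [ih]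
    simp

lemma pvZip_prefixes : ∀ (data : List String) (a : Int),
    data.zip ((pvZipPref data a).map Prod.snd) = pvZipPref data a := by
  intro data
  induction data with
  | nil => intro a; simp [pvZipPref]
  | cons s rs ih => intro a; simp [pvZipPref, List.zip_cons_cons, ih]

lemma pvChainEnds : ∀ (n : Nat) (a lo c : Int), 0 ≤ c → lo ≤ c * (a + 1) - 1 →
    List.IsChain (· ≤ ·)
      (lo :: (List.range n).map (fun (k : Nat) => c * ((a + (k : Int)) + 1) - 1)) := by
  intro n
  induction n with
  | zero => intro a lo c hc hlo; simp
  | succ m ih =>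
    intro a lo c hc hlo
    rw [List.range_succ_eq_map]
    simp only [List.map_cons, List.map_map]
    have he : ((List.range m).map ((fun (k : Nat) => c * ((a + (k : Int)) + 1) - 1) ∘ Nat.succ))
        = (List.range m).map (fun (k : Nat) => c * (((a + 1) + (k : Int)) + 1) - 1) := by
      apply List.map_congr_left
      intro k _
      simp only [Function.comp_apply]
      push_cast
      ring
    rw [List.isChain_cons_cons]
    constructor
    · simpa using hlo
    · rw [he]
      apply ih (a + 1) (c * ((a + (0:Nat) : Int) + 1) - 1) c hc
      have : c * (a + 1) ≤ c * (a + 2) := by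
        apply mul_le_mul_of_nonneg_left (by linarith) hc
      push_cast
      linarith

lemma pvCore : ∀ (ends : List Int) (lo accum : Int) (rest : List String)
    (pairs : List (String × Int)) (acc : List (List String)),
    List.IsChain (· ≤ ·) (lo :: ends) →
    pairs.filter (fun sp => decide (lo ≤ sp.2)) = pvZipPref rest accum →
    (ends.foldl pvAStep (acc, rest, accum)).1 = (ends.foldl (pvBStep pairs) (acc, lo)).1 := by
  intro ends
  induction ends with
  | nil => intro lo accum rest pairs acc _ _; rfl
  | cons e es ih =>
    intro lo accum rest pairs acc hch hinv
    have hle : lo ≤ e := (List.isChain_cons_cons.1 hch).1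
    have hch' : List.IsChain (· ≤ ·) (e :: es) := (List.isChain_cons_cons.1 hch).2
    simp only [List.foldl_cons]
    -- the chunk emitted this round is equal on both sides
    have hfilter : (pairs.filter (fun sp => decide (lo ≤ sp.2) && decide (sp.2 < e)))
        = (pvZipPref rest accum).filter (fun sp => decide (sp.2 < e)) := by
      rw [← hinv, ← List.filter_filter]
      rw [List.filter_comm]
    have hchunk : (pairs.filter (fun sp => decide (lo ≤ sp.2) && decide (sp.2 < e))).map Prod.fst
        = (pvTakeChunk rest accum e).1 := by
      rw [hfilter, pvFilter_lt_eq_takeWhile, (pvTakeChunk_spec rest accum e).1]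
    -- the invariant advanced past this boundary
    have hinv' : pairs.filter (fun sp => decide (e ≤ sp.2))
        = pvZipPref (pvTakeChunk rest accum e).2.1 (pvTakeChunk rest accum e).2.2 := by
      have hpt : ∀ sp : String × Int,
          (decide (e ≤ sp.2)) = ((fun sp : String × Int => decide (lo ≤ sp.2)) sp
            && decide (e ≤ sp.2)) := by
        intro sp
        by_cases h : e ≤ sp.2
        · simp [h, le_trans hle h]
        · simp [h]
      calc pairs.filter (fun sp => decide (e ≤ sp.2))
          = pairs.filter (fun sp => decide (lo ≤ sp.2) && decide (e ≤ sp.2)) := by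
            apply List.filter_congr; intro sp _; exact hpt sp
        _ = (pairs.filter (fun sp => decide (lo ≤ sp.2))).filter (fun sp => decide (e ≤ sp.2)) := by
            rw [← List.filter_filter]; rw [List.filter_comm]
        _ = (pvZipPref rest accum).filter (fun sp => decide (e ≤ sp.2)) := by rw [hinv]
        _ = (pvZipPref rest accum).dropWhile (fun sp => decide (sp.2 < e)) :=
            pvFilter_ge_eq_dropWhile rest accum e
        _ = _ := ((pvTakeChunk_spec rest accum e).2).symm
    show (es.foldl pvAStep (pvAStep (acc, rest, accum) e)).1
        = (es.foldl (pvBStep pairs) (pvBStep pairs (acc, lo) e)).1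
    simp only [pvAStep, pvBStep]
    rw [hchunk]
    exact ih e (pvTakeChunk rest accum e).2.2 (pvTakeChunk rest accum e).2.1 pairs
      (acc ++ [(pvTakeChunk rest accum e).1]) hch' hinv'

-- ===== VERDICT (by name: the statement is the Claim_ definition above) =====
theorem split_data_to_chunk_spec : Claim_equal_split_data_to_chunk := by
  intro data N _ hpre
  unfold Spec_split_data_to_chunk
  have hpairs : data.zip (pvPrefixes data) = pvZipPref data 0 := by
    unfold pvPrefixes
    rw [pvPrefixes_spec data [] 0]
    simpa using pvZip_prefixes data 0
  have hinv : (data.zip (pvPrefixes data)).filter (fun sp => decide ((-1:Int) ≤ sp.2))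
      = pvZipPref data 0 := by
    rw [hpairs]
    exact pvFilter_le_self data 0 (-1) (by norm_num)
  have hch : List.IsChain (· ≤ ·) ((-1 : Int) :: get_chunk_end_list data N) := by
    rcases lt_or_gt_of_ne hpre with h | h
    · have hnil : PySem.List.pyRange 0 N 1 = [] := PySem.List.pyRange_one_eq_nil (le_of_lt h)
      simp [get_chunk_end_list, hnil]
    · have hc : 0 ≤ PySem.Int.floordiv ((data.map PySem.Str.len).sum) N := by
        rw [PySem.Int.floordiv_eq_ediv_of_pos h]
        apply Int.ediv_nonneg _ (le_of_lt h)
        apply List.sum_nonneg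
        intro x hx
        simp only [List.mem_map] at hx
        obtain ⟨s, _, rfl⟩ := hx
        exact Int.zero_le_ofNat s.toList.length
      have heq : get_chunk_end_list data N
          = (List.range N.toNat).map (fun (k : Nat) =>
              PySem.Int.floordiv ((data.map PySem.Str.len).sum) N * (((0:Int) + (k : Int)) + 1) - 1) := by
        simp only [get_chunk_end_list]
        rw [PySem.List.pyRange_one]
        rw [List.map_map]
        simp
      rw [heq]
      apply pvChainEnds N.toNat 0 (-1) _ hc
      simp
      omega
  show split_data_to_chunk data N = split_data_to_chunk_alt data N
  unfold split_data_to_chunk split_data_to_chunk_alt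
  exact pvCore (get_chunk_end_list data N) (-1) 0 data (data.zip (pvPrefixes data)) [] hch hinv
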